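-- pv_equiv track=rewrite | github.com/csci3251-1155127407/helloWorld | codeitsuisse/routes/inventory_management.py | solve
-- ===== SOURCE A (Python) =====
-- def solve(word1, word2):
--     len1, len2 = len(word1), len(word2)
--     # Initialization
--     dp = [[0 for _ in range(len2 + 1)] for _ in range(len1 + 1)]
--     dir = [[-1 for _ in range(len2 + 1)] for _ in range(len1 + 1)]
--
--     # dir = 0, do nothing
--     # dir = 1, add
--     # dir = 2, remove
--     # dir = 3, replace
--
--     for i in range(len1 + 1):
--         dp[i][0] = i
--         dir[i][0] = 2
--
--     for j in range(len2 + 1):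
--         dp[0][j] = j
--         dir[0][j] = 1
--
--     # Iteration
--     for i in range(1, len1 + 1):
--         for j in range(1, len2 + 1):
--             if word1[i - 1].lower() == word2[j - 1].lower():
--                 dp[i][j] = dp[i - 1][j - 1]
--                 dir[i][j] = 0
--             else:
--                 mn = min(dp[i - 1][j], dp[i][j - 1], dp[i - 1][j - 1])
--                 if dp[i - 1][j] == mn:
--                     dir[i][j] = 2
--                 elif dp[i][j - 1] == mn:
--                     dir[i][j] = 1
--                 else:
--                     dir[i][j] = 3
--
--                 dp[i][j] = mn + 1
--
--     posx = len1
--     posy = len2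
--
--     res_string = ""
--
--     while posx > 0 or posy > 0:
--         if dir[posx][posy] == 0:
--             res_string += word1[posx - 1]
--             posx = posx - 1
--             posy = posy - 1
--         elif dir[posx][posy] == 1:
--             res_string += word2[posy - 1] + '+'
--             posy = posy - 1
--         elif dir[posx][posy] == 2:
--             res_string += word1[posx - 1] + '-'
--             posx = posx - 1
--         else:
--             res_string += word2[posy - 1]
--             posx = posx - 1
--             posy = posy - 1
--
--     return (dp[len1][len2], word2, res_string[::-1], )
-- ===== SOURCE B (Python) =====
-- def solve(word1, word2):
--     len1, len2 = len(word1), len(word2)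
--     # Each cell is (cost, chain) where chain is None or (op, parent_chain):
--     # an immutable backpointer list of ops (marker-first), shared between cells.
--     # Only two rolling rows are kept; no matrices survive and there is no
--     # backtracking pass over a table afterwards.
--     prev = [(0, None)]
--     for j in range(1, len2 + 1):
--         prev.append((j, ('+' + word2[j - 1], prev[j - 1][1])))
--     for i in range(1, len1 + 1):
--         ci = word1[i - 1]
--         cur = [(i, ('-' + ci, prev[0][1]))]
--         for j in range(1, len2 + 1):
--             cj = word2[j - 1]
--             if ci.lower() == cj.lower():
--                 c, ch = prev[j - 1]
--                 cur.append((c, (ci, ch)))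
--             else:
--                 up, left, diag = prev[j], cur[j - 1], prev[j - 1]
--                 mn = min(up[0], left[0], diag[0])
--                 if up[0] == mn:
--                     cur.append((mn + 1, ('-' + ci, up[1])))
--                 elif left[0] == mn:
--                     cur.append((mn + 1, ('+' + cj, left[1])))
--                 else:
--                     cur.append((mn + 1, (cj, diag[1])))
--         prev = cur
--     cost, chain = prev[len2]
--     ops = []
--     while chain is not None:
--         op, chain = chain
--         ops.append(op)
--     return (cost, word2, ''.join(reversed(ops)))
-- ===== Notes on version B (the rewrite author's own statement) =====
-- stated objective: alternative
-- what changed: B replaces A's two full matrices plus a direction-dispatch backtracking loop with a single forward pass over two rolling rows whose cells carry (cost, immutable shared backpointer chain of op strings); the script is read off the final cell's chain, so no table is retained and no traceback over indices happens.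
import Mathlib
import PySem

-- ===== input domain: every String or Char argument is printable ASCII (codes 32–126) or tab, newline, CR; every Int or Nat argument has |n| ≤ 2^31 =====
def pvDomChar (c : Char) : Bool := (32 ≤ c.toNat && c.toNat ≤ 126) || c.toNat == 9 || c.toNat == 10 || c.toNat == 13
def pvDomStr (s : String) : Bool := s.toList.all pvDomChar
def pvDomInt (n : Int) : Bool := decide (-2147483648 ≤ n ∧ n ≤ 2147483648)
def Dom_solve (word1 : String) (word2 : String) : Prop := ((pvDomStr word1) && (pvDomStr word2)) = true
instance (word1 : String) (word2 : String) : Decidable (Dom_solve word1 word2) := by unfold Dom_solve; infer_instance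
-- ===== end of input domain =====

-- B replaces A's two full matrices and direction-dispatch backtracking loop by a single
-- forward pass over two rolling rows whose cells carry (cost, shared backpointer chain of
-- op strings); the script is read off the final cell's chain — objective: alternative.

-- Both ports model Python strings as List Char. A's list-of-lists tables are modelled as
-- finite maps from (row, column) to value, represented as association lists (newest write
-- first, lookup = first match, with the table's initialisation value as lookup default);
-- every Python read/write is at an in-range non-negative index, where this representation
-- is exact. Character reads word[i-1] (always in range in the Python) are ported as
-- List.getD with an irrelevant default.

-- ===== PORT A =====
def pvSet (t : List ((Nat × Nat) × Int)) (i j : Nat) (v : Int) : List ((Nat × Nat) × Int) :=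
  ((i, j), v) :: t

def pvGet (t : List ((Nat × Nat) × Int)) (d : Int) (a b : Nat) : Int :=
  match t with
  | [] => d
  | ((p, q), v) :: rest => if a = p ∧ b = q then v else pvGet rest d a b

-- body of A's inner loop: writes dp[i][j] and dir[i][j]
def pvCellA (w1 w2 : List Char) (s : List ((Nat × Nat) × Int) × List ((Nat × Nat) × Int)) (i j : Nat) :
    List ((Nat × Nat) × Int) × List ((Nat × Nat) × Int) :=
  if PySem.Chars.lowerChar (w1.getD (i-1) ' ') = PySem.Chars.lowerChar (w2.getD (j-1) ' ') then
    (pvSet s.1 i j (pvGet s.1 0 (i-1) (j-1)), pvSet s.2 i j 0)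
  else
    let mn := min (min (pvGet s.1 0 (i-1) j) (pvGet s.1 0 i (j-1))) (pvGet s.1 0 (i-1) (j-1))
    (pvSet s.1 i j (mn + 1),
      if pvGet s.1 0 (i-1) j = mn then pvSet s.2 i j 2
      else if pvGet s.1 0 i (j-1) = mn then pvSet s.2 i j 1
      else pvSet s.2 i j 3)

-- initialisation + the two boundary loops + the double loop of A
def pvFillA (w1 w2 : List Char) : List ((Nat × Nat) × Int) × List ((Nat × Nat) × Int) :=
  let len1 := w1.length
  let len2 := w2.length
  let s0 : List ((Nat × Nat) × Int) × List ((Nat × Nat) × Int) := ([], [])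
  let s1 := (List.range (len1+1)).foldl (fun s i => (pvSet s.1 i 0 (i : Int), pvSet s.2 i 0 2)) s0
  let s2 := (List.range (len2+1)).foldl (fun s j => (pvSet s.1 0 j (j : Int), pvSet s.2 0 j 1)) s1
  (List.range' 1 len1).foldl
    (fun s i => (List.range' 1 len2).foldl (fun s j => pvCellA w1 w2 s i j) s) s2

-- A's while loop, fuel = posx + posy at entry (each real iteration decreases it)
def pvBtA (w1 w2 : List Char) (dir : List ((Nat × Nat) × Int)) :
    Nat → Nat → Nat → List Char → List Char
  | 0, _, _, res => res
  | fuel+1, posx, posy, res =>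
    if posx > 0 ∨ posy > 0 then
      if pvGet dir (-1) posx posy = 0 then
        pvBtA w1 w2 dir fuel (posx-1) (posy-1) (res ++ [w1.getD (posx-1) ' '])
      else if pvGet dir (-1) posx posy = 1 then
        pvBtA w1 w2 dir fuel posx (posy-1) (res ++ [w2.getD (posy-1) ' ', '+'])
      else if pvGet dir (-1) posx posy = 2 then
        pvBtA w1 w2 dir fuel (posx-1) posy (res ++ [w1.getD (posx-1) ' ', '-'])
      else
        pvBtA w1 w2 dir fuel (posx-1) (posy-1) (res ++ [w2.getD (posy-1) ' '])
    else res

def solve (word1 : String) (word2 : String) : Int × String × String :=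
  let w1 := word1.toList
  let w2 := word2.toList
  let s := pvFillA w1 w2
  let res := pvBtA w1 w2 s.2 (w1.length + w2.length) w1.length w2.length []
  (pvGet s.1 0 w1.length w2.length, word2, String.mk res.reverse)

-- ===== PORT B =====
-- A cell is (cost, chain); Python's nested backpointer tuple (op, parent) is exactly a
-- cons cell, so a chain is ported as List (List Char) (head = op at this cell).

-- B's first loop: builds row 0
def pvRow0 (w2 : List Char) : List (Int × List (List Char)) :=
  (List.range' 1 w2.length).foldl
    (fun prev (j : Nat) =>
      prev ++ [((j : Int), (['+', w2.getD (j-1) ' ']) :: (prev.getD (j-1) ((0:Int), [])).2)])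
    [((0 : Int), ([] : List (List Char)))]

-- B's body of the outer loop: builds row i from row i-1
def pvRowStep (w1 w2 : List Char) (prev : List (Int × List (List Char))) (i : Nat) :
    List (Int × List (List Char)) :=
  (List.range' 1 w2.length).foldl
    (fun cur j =>
      cur ++ [
        if PySem.Chars.lowerChar (w1.getD (i-1) ' ') = PySem.Chars.lowerChar (w2.getD (j-1) ' ') then
          ((prev.getD (j-1) ((0:Int), [])).1, [w1.getD (i-1) ' '] :: (prev.getD (j-1) ((0:Int), [])).2)
        else
          let up := prev.getD j ((0:Int), [])
          let left := cur.getD (j-1) ((0:Int), [])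
          let diag := prev.getD (j-1) ((0:Int), [])
          let mn := min (min up.1 left.1) diag.1
          if up.1 = mn then (mn + 1, ['-', w1.getD (i-1) ' '] :: up.2)
          else if left.1 = mn then (mn + 1, ['+', w2.getD (j-1) ' '] :: left.2)
          else (mn + 1, [w2.getD (j-1) ' '] :: diag.2)])
    [((i : Int), ['-', w1.getD (i-1) ' '] :: (prev.getD 0 ((0:Int), [])).2)]

-- B's final while loop: pops the chain into ops
def pvWalk : List (List Char) → List (List Char) → List (List Char)
  | acc, [] => acc
  | acc, op :: rest => pvWalk (acc ++ [op]) rest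

def solve_alt (word1 : String) (word2 : String) : Int × String × String :=
  let w1 := word1.toList
  let w2 := word2.toList
  let last := (List.range' 1 w1.length).foldl (fun prev i => pvRowStep w1 w2 prev i) (pvRow0 w2)
  let cell := last.getD w2.length ((0:Int), [])
  let ops := pvWalk [] cell.2
  (cell.1, word2, String.mk ops.reverse.flatten)

-- ===== PRECONDITION & SPEC =====
def Spec_solve (word1 : String) (word2 : String) (out : Int × String × String) : Prop := out = solve_alt word1 word2
instance (word1 : String) (word2 : String) (out : Int × String × String) : Decidable (Spec_solve word1 word2 out) := by unfold Spec_solve; infer_instance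

-- ===== CLAIM (what is proved, stated in full; the proofs are below) =====
def Claim_equal_solve : Prop := ∀ (word1 : String) (word2 : String), Dom_solve word1 word2 → Spec_solve word1 word2 (solve word1 word2)

-- ===== LEMMAS AND PROOFS =====

-- the edit-distance recurrence both tables compute
def pvD (w1 w2 : List Char) : Nat → Nat → Int
  | x, 0 => (x : Int)
  | 0, y+1 => ((y : Int) + 1)
  | x+1, y+1 =>
    if PySem.Chars.lowerChar (w1.getD x ' ') = PySem.Chars.lowerChar (w2.getD y ' ') then
      pvD w1 w2 x y
    else
      min (min (pvD w1 w2 x (y+1)) (pvD w1 w2 (x+1) y)) (pvD w1 w2 x y) + 1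
  termination_by x y => (x, y)

-- what A's dir matrix holds at an interior cell, as a function of pvD
def pvDirF (w1 w2 : List Char) (x y : Nat) : Int :=
  if PySem.Chars.lowerChar (w1.getD (x-1) ' ') = PySem.Chars.lowerChar (w2.getD (y-1) ' ') then 0
  else
    let mn := min (min (pvD w1 w2 (x-1) y) (pvD w1 w2 x (y-1))) (pvD w1 w2 (x-1) (y-1))
    if pvD w1 w2 (x-1) y = mn then 2
    else if pvD w1 w2 x (y-1) = mn then 1
    else 3

-- the op chain of cell (x, y): ops along the chosen path, newest first
def pvChain (w1 w2 : List Char) : Nat → Nat → List (List Char)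
  | 0, 0 => []
  | 0, y+1 => ['+', w2.getD y ' '] :: pvChain w1 w2 0 y
  | x+1, 0 => ['-', w1.getD x ' '] :: pvChain w1 w2 x 0
  | x+1, y+1 =>
    if PySem.Chars.lowerChar (w1.getD x ' ') = PySem.Chars.lowerChar (w2.getD y ' ') then
      [w1.getD x ' '] :: pvChain w1 w2 x y
    else
      let mn := min (min (pvD w1 w2 x (y+1)) (pvD w1 w2 (x+1) y)) (pvD w1 w2 x y)
      if pvD w1 w2 x (y+1) = mn then ['-', w1.getD x ' '] :: pvChain w1 w2 x (y+1)
      else if pvD w1 w2 (x+1) y = mn then ['+', w2.getD y ' '] :: pvChain w1 w2 (x+1) y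
      else [w2.getD y ' '] :: pvChain w1 w2 x y
  termination_by x y => (x, y)

theorem pvGet_set_eq (t : List ((Nat × Nat) × Int)) (d : Int) (i j : Nat) (v : Int) :
    pvGet (pvSet t i j v) d i j = v := by
  simp [pvGet, pvSet]

theorem pvGet_set_ne (t : List ((Nat × Nat) × Int)) (d : Int) (i j a b : Nat) (v : Int)
    (h : a ≠ i ∨ b ≠ j) : pvGet (pvSet t i j v) d a b = pvGet t d a b := by
  simp only [pvGet, pvSet]
  rcases h with h | h <;> simp [h]

theorem pvD_zero (w1 w2 : List Char) (y : Nat) : pvD w1 w2 0 y = (y : Int) := by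
  cases y <;> simp [pvD]

theorem pvD_x0 (w1 w2 : List Char) (x : Nat) : pvD w1 w2 x 0 = (x : Int) := by
  cases x <;> simp [pvD]

-- values of the two boundary fills of A, pointwise
theorem pv_fill1_val (n : Nat) (s : List ((Nat × Nat) × Int) × List ((Nat × Nat) × Int)) (a b : Nat) :
    (pvGet ((List.range n).foldl (fun s i => (pvSet s.1 i 0 (i : Int), pvSet s.2 i 0 2)) s).1 0 a b
        = if b = 0 ∧ a < n then (a : Int) else pvGet s.1 0 a b) ∧
    (pvGet ((List.range n).foldl (fun s i => (pvSet s.1 i 0 (i : Int), pvSet s.2 i 0 2)) s).2 (-1) a b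
        = if b = 0 ∧ a < n then 2 else pvGet s.2 (-1) a b) := by
  induction n with
  | zero => simp
  | succ n ih =>
    rw [List.range_succ, List.foldl_append]
    simp only [List.foldl_cons, List.foldl_nil]
    constructor
    · by_cases h1 : a = n ∧ b = 0
      · obtain ⟨rfl, rfl⟩ := h1
        show pvGet (pvSet _ a 0 _) _ a 0 = _
        rw [pvGet_set_eq, if_pos ⟨rfl, by omega⟩]
      · show pvGet (pvSet _ n 0 _) _ a b = _
        rw [pvGet_set_ne _ _ _ _ _ _ _ (by omega), ih.1]
        split_ifs <;> first | rfl | omega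
    · by_cases h1 : a = n ∧ b = 0
      · obtain ⟨rfl, rfl⟩ := h1
        show pvGet (pvSet _ a 0 _) _ a 0 = _
        rw [pvGet_set_eq, if_pos ⟨rfl, by omega⟩]
      · show pvGet (pvSet _ n 0 _) _ a b = _
        rw [pvGet_set_ne _ _ _ _ _ _ _ (by omega), ih.2]
        split_ifs <;> first | rfl | omega

theorem pv_fill2_val (n : Nat) (s : List ((Nat × Nat) × Int) × List ((Nat × Nat) × Int)) (a b : Nat) :
    (pvGet ((List.range n).foldl (fun s j => (pvSet s.1 0 j (j : Int), pvSet s.2 0 j 1)) s).1 0 a b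
        = if a = 0 ∧ b < n then (b : Int) else pvGet s.1 0 a b) ∧
    (pvGet ((List.range n).foldl (fun s j => (pvSet s.1 0 j (j : Int), pvSet s.2 0 j 1)) s).2 (-1) a b
        = if a = 0 ∧ b < n then 1 else pvGet s.2 (-1) a b) := by
  induction n with
  | zero => simp
  | succ n ih =>
    rw [List.range_succ, List.foldl_append]
    simp only [List.foldl_cons, List.foldl_nil]
    constructor
    · by_cases h1 : a = 0 ∧ b = n
      · obtain ⟨rfl, rfl⟩ := h1
        show pvGet (pvSet _ 0 b _) _ 0 b = _
        rw [pvGet_set_eq, if_pos ⟨rfl, by omega⟩]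
      · show pvGet (pvSet _ 0 n _) _ a b = _
        rw [pvGet_set_ne _ _ _ _ _ _ _ (by omega), ih.1]
        split_ifs <;> first | rfl | omega
    · by_cases h1 : a = 0 ∧ b = n
      · obtain ⟨rfl, rfl⟩ := h1
        show pvGet (pvSet _ 0 b _) _ 0 b = _
        rw [pvGet_set_eq, if_pos ⟨rfl, by omega⟩]
      · show pvGet (pvSet _ 0 n _) _ a b = _
        rw [pvGet_set_ne _ _ _ _ _ _ _ (by omega), ih.2]
        split_ifs <;> first | rfl | omega

-- the invariant of A's double loop: rows < i and the first j cells of row i are final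
def pvInv (w1 w2 : List Char) (i j : Nat) (s : List ((Nat × Nat) × Int) × List ((Nat × Nat) × Int)) : Prop :=
  (∀ y, y ≤ w2.length → pvGet s.1 0 0 y = pvD w1 w2 0 y) ∧
  (∀ x, x ≤ w1.length → pvGet s.1 0 x 0 = pvD w1 w2 x 0) ∧
  (∀ y, y ≤ w2.length → pvGet s.2 (-1) 0 y = 1) ∧
  (∀ x, 1 ≤ x → x ≤ w1.length → pvGet s.2 (-1) x 0 = 2) ∧
  (∀ a b, 1 ≤ a → a < i → 1 ≤ b → b ≤ w2.length →
      pvGet s.1 0 a b = pvD w1 w2 a b ∧ pvGet s.2 (-1) a b = pvDirF w1 w2 a b) ∧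
  (∀ b, 1 ≤ b → b ≤ j → pvGet s.1 0 i b = pvD w1 w2 i b ∧ pvGet s.2 (-1) i b = pvDirF w1 w2 i b)

theorem pvInv_cell (w1 w2 : List Char) (i j : Nat) (s : List ((Nat × Nat) × Int) × List ((Nat × Nat) × Int))
    (hi1 : 1 ≤ i) (hi2 : i ≤ w1.length) (hj : j < w2.length) (h : pvInv w1 w2 i j s) :
    pvInv w1 w2 i (j+1) (pvCellA w1 w2 s i (j+1)) := by
  obtain ⟨h1, h2, h3, h4, h5, h6⟩ := h
  obtain ⟨i', rfl⟩ : ∃ i', i = i' + 1 := ⟨i - 1, by omega⟩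
  have hA : pvGet s.1 0 i' (j+1) = pvD w1 w2 i' (j+1) := by
    rcases Nat.eq_zero_or_pos i' with h0 | h0
    · subst h0; exact h1 (j+1) (by omega)
    · exact (h5 i' (j+1) h0 (by omega) (by omega) (by omega)).1
  have hB : pvGet s.1 0 (i'+1) j = pvD w1 w2 (i'+1) j := by
    rcases Nat.eq_zero_or_pos j with h0 | h0
    · subst h0; exact h2 (i'+1) hi2
    · exact (h6 j h0 (le_refl j)).1
  have hC : pvGet s.1 0 i' j = pvD w1 w2 i' j := by
    rcases Nat.eq_zero_or_pos i' with h0 | h0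
    · subst h0; exact h1 j (by omega)
    rcases Nat.eq_zero_or_pos j with hj0 | hj0
    · subst hj0; exact h2 i' (by omega)
    · exact (h5 i' j h0 (by omega) hj0 (by omega)).1
  have kdp : (pvCellA w1 w2 s (i'+1) (j+1)).1
      = pvSet s.1 (i'+1) (j+1) (pvD w1 w2 (i'+1) (j+1)) := by
    unfold pvCellA
    simp only [Nat.add_sub_cancel]
    rw [show pvD w1 w2 (i'+1) (j+1)
        = if PySem.Chars.lowerChar (w1.getD i' ' ') = PySem.Chars.lowerChar (w2.getD j ' ') then
            pvD w1 w2 i' j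
          else
            min (min (pvD w1 w2 i' (j+1)) (pvD w1 w2 (i'+1) j)) (pvD w1 w2 i' j) + 1 from by
      rw [pvD]]
    rw [← hA, ← hB, ← hC]
    split_ifs <;> rfl
  have kdir : (pvCellA w1 w2 s (i'+1) (j+1)).2
      = pvSet s.2 (i'+1) (j+1) (pvDirF w1 w2 (i'+1) (j+1)) := by
    unfold pvCellA pvDirF
    simp only [Nat.add_sub_cancel]
    rw [← hA, ← hB, ← hC]
    split_ifs <;> rfl
  refine ⟨?_, ?_, ?_, ?_, ?_, ?_⟩
  · intro y hy; rw [kdp, pvGet_set_ne _ _ _ _ _ _ _ (Or.inl (by omega))]; exact h1 y hy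
  · intro x hx
    rw [kdp, pvGet_set_ne _ _ _ _ _ _ _ (Or.inr (by omega))]; exact h2 x hx
  · intro y hy; rw [kdir, pvGet_set_ne _ _ _ _ _ _ _ (Or.inl (by omega))]; exact h3 y hy
  · intro x hx1 hx2; rw [kdir, pvGet_set_ne _ _ _ _ _ _ _ (Or.inr (by omega))]; exact h4 x hx1 hx2
  · intro a b ha hai hb hble
    rw [kdp, kdir, pvGet_set_ne _ _ _ _ _ _ _ (Or.inl (by omega)),
      pvGet_set_ne _ _ _ _ _ _ _ (Or.inl (by omega))]
    exact h5 a b ha hai hb hble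
  · intro b hb hble
    rcases Nat.eq_or_lt_of_le hble with heq | hlt
    · subst heq; rw [kdp, kdir, pvGet_set_eq, pvGet_set_eq]; exact ⟨rfl, rfl⟩
    · rw [kdp, kdir, pvGet_set_ne _ _ _ _ _ _ _ (Or.inr (by omega)),
        pvGet_set_ne _ _ _ _ _ _ _ (Or.inr (by omega))]
      exact h6 b hb (by omega)

theorem pvInv_inner (w1 w2 : List Char) (i : Nat) (hi1 : 1 ≤ i) (hi2 : i ≤ w1.length) :
    ∀ (n j : Nat) (s : List ((Nat × Nat) × Int) × List ((Nat × Nat) × Int)), j + n ≤ w2.length → pvInv w1 w2 i j s →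
      pvInv w1 w2 i (j+n) ((List.range' (j+1) n).foldl (fun s j => pvCellA w1 w2 s i j) s) := by
  intro n
  induction n with
  | zero => intro j s _ h; simpa using h
  | succ n ih =>
    intro j s hle h
    rw [List.range'_succ]
    simp only [List.foldl_cons]
    have := ih (j+1) (pvCellA w1 w2 s i (j+1)) (by omega) (pvInv_cell w1 w2 i j s hi1 hi2 (by omega) h)
    have heq : j + (n+1) = (j+1) + n := by omega
    rw [heq]; exact this

theorem pvInv_next_row (w1 w2 : List Char) (i : Nat) (s : List ((Nat × Nat) × Int) × List ((Nat × Nat) × Int))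
    (h : pvInv w1 w2 i w2.length s) : pvInv w1 w2 (i+1) 0 s := by
  obtain ⟨h1, h2, h3, h4, h5, h6⟩ := h
  refine ⟨h1, h2, h3, h4, ?_, ?_⟩
  · intro a b ha hai hb hble
    by_cases hlt : a < i
    · exact h5 a b ha hlt hb hble
    · have : a = i := by omega
      subst this; exact h6 b hb hble
  · intro b hb hble; omega

theorem pvInv_outer (w1 w2 : List Char) :
    ∀ (n i : Nat) (s : List ((Nat × Nat) × Int) × List ((Nat × Nat) × Int)), 1 ≤ i → i + n ≤ w1.length + 1 →
      pvInv w1 w2 i 0 s →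
      pvInv w1 w2 (i+n) 0 ((List.range' i n).foldl
        (fun s i => (List.range' 1 w2.length).foldl (fun s j => pvCellA w1 w2 s i j) s) s) := by
  intro n
  induction n with
  | zero => intro i s _ _ h; simpa using h
  | succ n ih =>
    intro i s hi hle h
    rw [List.range'_succ]
    simp only [List.foldl_cons]
    have hrow := pvInv_inner w1 w2 i hi (by omega) w2.length 0 s (by omega) h
    simp only [Nat.zero_add] at hrow
    have := ih (i+1) _ (by omega) (by omega) (pvInv_next_row w1 w2 i _ hrow)
    have heq : i + (n+1) = (i+1) + n := by omega
    rw [heq]; exact this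

theorem pvInv_init (w1 w2 : List Char) :
    pvInv w1 w2 1 0
      ((List.range (w2.length+1)).foldl (fun s j => (pvSet s.1 0 j (j : Int), pvSet s.2 0 j 1))
        ((List.range (w1.length+1)).foldl (fun s i => (pvSet s.1 i 0 (i : Int), pvSet s.2 i 0 2))
          ([], []))) := by
  refine ⟨?_, ?_, ?_, ?_, ?_, ?_⟩
  · intro y hy
    rw [(pv_fill2_val _ _ 0 y).1, pvD_zero]
    simp [Nat.lt_succ_of_le hy]
  · intro x hx
    rw [(pv_fill2_val _ _ x 0).1, pvD_x0]
    rcases Nat.eq_zero_or_pos x with h0 | h0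
    · simp [h0]
    · rw [if_neg (by omega), (pv_fill1_val _ _ x 0).1, if_pos ⟨rfl, by omega⟩]
  · intro y hy
    rw [(pv_fill2_val _ _ 0 y).2]
    simp [Nat.lt_succ_of_le hy]
  · intro x hx1 hx2
    rw [(pv_fill2_val _ _ x 0).2, if_neg (by omega), (pv_fill1_val _ _ x 0).2,
      if_pos ⟨rfl, by omega⟩]
  · intro a b ha hai hb hble; omega
  · intro b hb hble; omega

-- the fully built tables of A, characterised
theorem pvFillA_spec (w1 w2 : List Char) :
    (∀ x y, x ≤ w1.length → y ≤ w2.length → pvGet (pvFillA w1 w2).1 0 x y = pvD w1 w2 x y) ∧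
    (∀ y, y ≤ w2.length → pvGet (pvFillA w1 w2).2 (-1) 0 y = 1) ∧
    (∀ x, 1 ≤ x → x ≤ w1.length → pvGet (pvFillA w1 w2).2 (-1) x 0 = 2) ∧
    (∀ x y, 1 ≤ x → x ≤ w1.length → 1 ≤ y → y ≤ w2.length →
      pvGet (pvFillA w1 w2).2 (-1) x y = pvDirF w1 w2 x y) := by
  have h := pvInv_outer w1 w2 w1.length 1 _ (le_refl 1) (by omega) (pvInv_init w1 w2)
  have hfold : pvFillA w1 w2 = (List.range' 1 w1.length).foldl
        (fun s i => (List.range' 1 w2.length).foldl (fun s j => pvCellA w1 w2 s i j) s)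
        ((List.range (w2.length+1)).foldl (fun s j => (pvSet s.1 0 j (j : Int), pvSet s.2 0 j 1))
          ((List.range (w1.length+1)).foldl (fun s i => (pvSet s.1 i 0 (i : Int), pvSet s.2 i 0 2))
            ([], []))) := rfl
  rw [hfold]
  obtain ⟨h1, h2, h3, h4, h5, _⟩ := h
  refine ⟨?_, h3, h4, ?_⟩
  · intro x y hx hy
    rcases Nat.eq_zero_or_pos x with hx0 | hx0
    · subst hx0; exact h1 y hy
    rcases Nat.eq_zero_or_pos y with hy0 | hy0
    · subst hy0; exact h2 x hx
    · exact (h5 x y hx0 (by omega) hy0 hy).1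
  · intro x y hx1 hx2 hy1 hy2
    exact (h5 x y hx1 (by omega) hy1 hy2).2

-- A's backtrack result, expressed through the chain of cell (x, y)
theorem pv_btA_chain (w1 w2 : List Char) (dir : List ((Nat × Nat) × Int))
    (hd1 : ∀ y, y ≤ w2.length → pvGet dir (-1) 0 y = 1)
    (hd2 : ∀ x, 1 ≤ x → x ≤ w1.length → pvGet dir (-1) x 0 = 2)
    (hd3 : ∀ x y, 1 ≤ x → x ≤ w1.length → 1 ≤ y → y ≤ w2.length → pvGet dir (-1) x y = pvDirF w1 w2 x y) :
    ∀ (fuel x y : Nat) (res : List Char), x ≤ w1.length → y ≤ w2.length → x + y ≤ fuel →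
      (pvBtA w1 w2 dir fuel x y res).reverse = (pvChain w1 w2 x y).reverse.flatten ++ res.reverse := by
  intro fuel
  induction fuel with
  | zero =>
    intro x y res hx hy hf
    obtain ⟨rfl, rfl⟩ : x = 0 ∧ y = 0 := by omega
    simp [pvBtA, pvChain]
  | succ fuel ih =>
    intro x y res hx hy hf
    rw [pvBtA]
    by_cases hxy : x > 0 ∨ y > 0
    · rw [if_pos hxy]
      rcases Nat.eq_zero_or_pos x with hx0 | hx0
      · subst hx0
        obtain ⟨y', rfl⟩ : ∃ y', y = y' + 1 := ⟨y - 1, by omega⟩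
        rw [hd1 (y'+1) hy]
        rw [if_neg (show ¬(1:Int) = 0 by norm_num), if_pos (show (1:Int) = 1 from rfl)]
        simp only [Nat.add_sub_cancel]
        rw [ih 0 y' _ (by omega) (by omega) (by omega)]
        rw [show pvChain w1 w2 0 (y'+1) = ['+', w2.getD y' ' '] :: pvChain w1 w2 0 y' from by
          rw [pvChain]]
        simp
      rcases Nat.eq_zero_or_pos y with hy0 | hy0
      · subst hy0
        obtain ⟨x', rfl⟩ : ∃ x', x = x' + 1 := ⟨x - 1, by omega⟩
        rw [hd2 (x'+1) hx0 hx]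
        rw [if_neg (show ¬(2:Int) = 0 by norm_num), if_neg (show ¬(2:Int) = 1 by norm_num),
          if_pos (show (2:Int) = 2 from rfl)]
        simp only [Nat.add_sub_cancel]
        rw [ih x' 0 _ (by omega) (by omega) (by omega)]
        rw [show pvChain w1 w2 (x'+1) 0 = ['-', w1.getD x' ' '] :: pvChain w1 w2 x' 0 from by
          rw [pvChain]]
        simp
      · obtain ⟨x', rfl⟩ : ∃ x', x = x' + 1 := ⟨x - 1, by omega⟩
        obtain ⟨y', rfl⟩ : ∃ y', y = y' + 1 := ⟨y - 1, by omega⟩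
        have hdv := hd3 (x'+1) (y'+1) hx0 hx hy0 hy
        rw [pvDirF] at hdv
        simp only [Nat.add_sub_cancel] at hdv
        have hch : pvChain w1 w2 (x'+1) (y'+1)
            = if PySem.Chars.lowerChar (w1.getD x' ' ') = PySem.Chars.lowerChar (w2.getD y' ' ') then
                [w1.getD x' ' '] :: pvChain w1 w2 x' y'
              else
                let mn := min (min (pvD w1 w2 x' (y'+1)) (pvD w1 w2 (x'+1) y')) (pvD w1 w2 x' y')
                if pvD w1 w2 x' (y'+1) = mn then ['-', w1.getD x' ' '] :: pvChain w1 w2 x' (y'+1)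
                else if pvD w1 w2 (x'+1) y' = mn then ['+', w2.getD y' ' '] :: pvChain w1 w2 (x'+1) y'
                else [w2.getD y' ' '] :: pvChain w1 w2 x' y' := by
          rw [pvChain]
        simp only [Nat.add_sub_cancel]
        by_cases hm : PySem.Chars.lowerChar (w1.getD x' ' ') = PySem.Chars.lowerChar (w2.getD y' ' ')
        · rw [if_pos hm] at hdv
          rw [if_pos hm] at hch
          rw [hdv, if_pos (show (0:Int) = 0 from rfl)]
          rw [ih x' y' _ (by omega) (by omega) (by omega), hch]
          simp
        · rw [if_neg hm] at hdv
          rw [if_neg hm] at hch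
          simp only at hdv hch
          by_cases h2c : pvD w1 w2 x' (y'+1)
              = min (min (pvD w1 w2 x' (y'+1)) (pvD w1 w2 (x'+1) y')) (pvD w1 w2 x' y')
          · rw [if_pos h2c] at hdv hch
            rw [hdv, if_neg (show ¬(2:Int) = 0 by norm_num),
              if_neg (show ¬(2:Int) = 1 by norm_num), if_pos (show (2:Int) = 2 from rfl)]
            rw [ih x' (y'+1) _ (by omega) (by omega) (by omega), hch]
            simp
          · rw [if_neg h2c] at hdv hch
            by_cases h1c : pvD w1 w2 (x'+1) y'
                = min (min (pvD w1 w2 x' (y'+1)) (pvD w1 w2 (x'+1) y')) (pvD w1 w2 x' y')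
            · rw [if_pos h1c] at hdv hch
              rw [hdv, if_neg (show ¬(1:Int) = 0 by norm_num), if_pos (show (1:Int) = 1 from rfl)]
              rw [ih (x'+1) y' _ (by omega) (by omega) (by omega), hch]
              simp
            · rw [if_neg h1c] at hdv hch
              rw [hdv, if_neg (show ¬(3:Int) = 0 by norm_num),
                if_neg (show ¬(3:Int) = 1 by norm_num), if_neg (show ¬(3:Int) = 2 by norm_num)]
              rw [ih x' y' _ (by omega) (by omega) (by omega), hch]
              simp
    · rw [if_neg hxy]
      obtain ⟨rfl, rfl⟩ : x = 0 ∧ y = 0 := by omega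
      simp [pvChain]

-- B's chain walk is the identity on the chain
theorem pvWalk_id : ∀ (l acc : List (List Char)), pvWalk acc l = acc ++ l := by
  intro l
  induction l with
  | nil => intro acc; simp [pvWalk]
  | cons op rest ih => intro acc; rw [pvWalk, ih]; simp

-- generic shape of B's row-building folds: append one new cell per step
theorem pvFold_build {α : Type} (e : List α → Nat → α) (g : Nat → α) (d : α) (n : Nat)
    (hstep : ∀ (r : List α) (j : Nat), 1 ≤ j → j ≤ n → r.length = j →
        (∀ k, k < j → r.getD k d = g k) → e r j = g j) :
    ∀ m, m ≤ n → ∀ init : List α, init.length = 1 → init.getD 0 d = g 0 →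
      ((List.range' 1 m).foldl (fun r j => r ++ [e r j]) init).length = m + 1 ∧
      ∀ k, k ≤ m → ((List.range' 1 m).foldl (fun r j => r ++ [e r j]) init).getD k d = g k := by
  intro m
  induction m with
  | zero =>
    intro _ init hlen h0
    refine ⟨by simpa using hlen, ?_⟩
    intro k hk
    have : k = 0 := by omega
    subst this; simpa using h0
  | succ m ih =>
    intro hmn init hlen h0
    obtain ⟨ihlen, ihget⟩ := ih (by omega) init hlen h0
    rw [List.range'_concat, List.foldl_append]
    simp only [List.foldl_cons, List.foldl_nil]
    set R := (List.range' 1 m).foldl (fun r j => r ++ [e r j]) init with hR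
    have hval : e R (1 + m) = g (1 + m) := by
      apply hstep R (1 + m) (by omega) (by omega) (by omega)
      intro k hk
      exact ihget k (by omega)
    constructor
    · simp [ihlen]
    · intro k hk
      rcases Nat.lt_or_ge k (m + 1) with hlt | hge
      · rw [List.getD_append _ _ _ _ (by omega)]
        exact ihget k (by omega)
      · have hk1 : k = m + 1 := by omega
        subst hk1
        rw [List.getD_append_right _ _ _ _ (by omega)]
        simp only [ihlen]
        simpa using hval.trans (by rw [Nat.add_comm])

-- row 0 of B holds (pvD 0 j, pvChain 0 j)
theorem pvRow0_ok (w1 w2 : List Char) :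
    (pvRow0 w2).length = w2.length + 1 ∧
    ∀ k, k ≤ w2.length → (pvRow0 w2).getD k ((0:Int), []) = (pvD w1 w2 0 k, pvChain w1 w2 0 k) := by
  have h := pvFold_build
    (fun prev j => ((j : Int), (['+', w2.getD (j-1) ' ']) :: (prev.getD (j-1) ((0:Int), [])).2))
    (fun j => (pvD w1 w2 0 j, pvChain w1 w2 0 j)) ((0:Int), ([] : List (List Char))) w2.length
    ?_ w2.length (le_refl _) [((0 : Int), ([] : List (List Char)))] rfl ?_
  · exact h
  · intro r j hj1 _ _ hk
    obtain ⟨j', rfl⟩ : ∃ j', j = j' + 1 := ⟨j - 1, by omega⟩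
    simp only [Nat.add_sub_cancel]
    rw [hk j' (by omega)]
    rw [show pvChain w1 w2 0 (j'+1) = ['+', w2.getD j' ' '] :: pvChain w1 w2 0 j' from by
      rw [pvChain]]
    rw [pvD_zero]
  · simp [pvD_zero, pvChain]

-- one row step of B preserves the row characterisation
theorem pvRowStep_ok (w1 w2 : List Char) (i : Nat) (prev : List (Int × List (List Char)))
    (_hlen : prev.length = w2.length + 1)
    (hprev : ∀ k, k ≤ w2.length → prev.getD k ((0:Int), []) = (pvD w1 w2 i k, pvChain w1 w2 i k)) :
    (pvRowStep w1 w2 prev (i+1)).length = w2.length + 1 ∧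
    ∀ k, k ≤ w2.length →
      (pvRowStep w1 w2 prev (i+1)).getD k ((0:Int), []) = (pvD w1 w2 (i+1) k, pvChain w1 w2 (i+1) k) := by
  have h := pvFold_build
    (fun cur j =>
      if PySem.Chars.lowerChar (w1.getD (i+1-1) ' ') = PySem.Chars.lowerChar (w2.getD (j-1) ' ') then
        ((prev.getD (j-1) ((0:Int), [])).1, [w1.getD (i+1-1) ' '] :: (prev.getD (j-1) ((0:Int), [])).2)
      else
        let up := prev.getD j ((0:Int), [])
        let left := cur.getD (j-1) ((0:Int), [])
        let diag := prev.getD (j-1) ((0:Int), [])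
        let mn := min (min up.1 left.1) diag.1
        if up.1 = mn then (mn + 1, ['-', w1.getD (i+1-1) ' '] :: up.2)
        else if left.1 = mn then (mn + 1, ['+', w2.getD (j-1) ' '] :: left.2)
        else (mn + 1, [w2.getD (j-1) ' '] :: diag.2))
    (fun j => (pvD w1 w2 (i+1) j, pvChain w1 w2 (i+1) j)) ((0:Int), ([] : List (List Char))) w2.length
    ?_ w2.length (le_refl _)
    [(((i+1) : Int), ['-', w1.getD (i+1-1) ' '] :: (prev.getD 0 ((0:Int), [])).2)] rfl ?_
  · exact h
  · intro cur j hj1 hjn _ hk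
    obtain ⟨j', rfl⟩ : ∃ j', j = j' + 1 := ⟨j - 1, by omega⟩
    simp only [Nat.add_sub_cancel]
    rw [hprev (j'+1) (by omega), hk j' (by omega), hprev j' (by omega)]
    rw [show pvD w1 w2 (i+1) (j'+1)
        = if PySem.Chars.lowerChar (w1.getD i ' ') = PySem.Chars.lowerChar (w2.getD j' ' ') then
            pvD w1 w2 i j'
          else
            min (min (pvD w1 w2 i (j'+1)) (pvD w1 w2 (i+1) j')) (pvD w1 w2 i j') + 1 from by
      rw [pvD]]
    rw [show pvChain w1 w2 (i+1) (j'+1)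
        = if PySem.Chars.lowerChar (w1.getD i ' ') = PySem.Chars.lowerChar (w2.getD j' ' ') then
            [w1.getD i ' '] :: pvChain w1 w2 i j'
          else
            let mn := min (min (pvD w1 w2 i (j'+1)) (pvD w1 w2 (i+1) j')) (pvD w1 w2 i j')
            if pvD w1 w2 i (j'+1) = mn then ['-', w1.getD i ' '] :: pvChain w1 w2 i (j'+1)
            else if pvD w1 w2 (i+1) j' = mn then ['+', w2.getD j' ' '] :: pvChain w1 w2 (i+1) j'
            else [w2.getD j' ' '] :: pvChain w1 w2 i j' from by
      rw [pvChain]]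
    dsimp only
    split_ifs <;> rfl
  · rw [hprev 0 (Nat.zero_le _)]
    dsimp only [List.getD_cons_zero]
    rw [show pvChain w1 w2 (i+1) 0 = ['-', w1.getD i ' '] :: pvChain w1 w2 i 0 from by
      rw [pvChain]]
    rw [pvD_x0]
    simp

-- all rows of B, by induction over the outer fold
theorem pvRows_ok (w1 w2 : List Char) :
    ∀ (n k : Nat) (prev : List (Int × List (List Char))),
      prev.length = w2.length + 1 →
      (∀ m, m ≤ w2.length → prev.getD m ((0:Int), []) = (pvD w1 w2 k m, pvChain w1 w2 k m)) →
      (((List.range' (k+1) n).foldl (fun prev i => pvRowStep w1 w2 prev i) prev).length = w2.length + 1 ∧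
       ∀ m, m ≤ w2.length →
         ((List.range' (k+1) n).foldl (fun prev i => pvRowStep w1 w2 prev i) prev).getD m ((0:Int), [])
           = (pvD w1 w2 (k+n) m, pvChain w1 w2 (k+n) m)) := by
  intro n
  induction n with
  | zero => intro k prev hlen h; simpa using ⟨hlen, h⟩
  | succ n ih =>
    intro k prev hlen h
    rw [List.range'_succ]
    simp only [List.foldl_cons]
    obtain ⟨slen, sget⟩ := pvRowStep_ok w1 w2 k prev hlen h
    have := ih (k+1) (pvRowStep w1 w2 prev (k+1)) slen sget
    have heq : k + (n+1) = (k+1) + n := by omega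
    rw [heq]; exact this

-- ===== VERDICT (by name: the statement is the Claim_ definition above) =====
theorem solve_spec : Claim_equal_solve := by
  intro word1 word2 _
  unfold Spec_solve solve solve_alt
  obtain ⟨hdp, hd1, hd2, hd3⟩ := pvFillA_spec word1.toList word2.toList
  obtain ⟨hlen, hget⟩ := pvRows_ok word1.toList word2.toList word1.toList.length 0 (pvRow0 word2.toList)
    (pvRow0_ok word1.toList word2.toList).1 (pvRow0_ok word1.toList word2.toList).2
  have hcell := hget word2.toList.length (le_refl _)
  simp only [Nat.zero_add] at hcell
  have hbt := pv_btA_chain word1.toList word2.toList (pvFillA word1.toList word2.toList).2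
      hd1 hd2 hd3 (word1.toList.length + word2.toList.length) word1.toList.length word2.toList.length
      [] (le_refl _) (le_refl _) (le_refl _)
  refine Prod.ext ?_ (Prod.ext rfl ?_)
  · show pvGet (pvFillA word1.toList word2.toList).1 0 word1.toList.length word2.toList.length
      = (((List.range' 1 word1.toList.length).foldl
          (fun prev i => pvRowStep word1.toList word2.toList prev i)
          (pvRow0 word2.toList)).getD word2.toList.length ((0:Int), [])).1
    rw [hdp _ _ (le_refl _) (le_refl _)]
    rw [hcell]
  · show String.mk (pvBtA word1.toList word2.toList (pvFillA word1.toList word2.toList).2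
        (word1.toList.length + word2.toList.length) word1.toList.length word2.toList.length []).reverse
      = String.mk ((pvWalk [] (((List.range' 1 word1.toList.length).foldl
          (fun prev i => pvRowStep word1.toList word2.toList prev i)
          (pvRow0 word2.toList)).getD word2.toList.length ((0:Int), [])).2).reverse.flatten)
    rw [pvWalk_id]
    rw [hcell, hbt]
    simp
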